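-- pv_equiv track=rewrite | github.com/loveDevcat/zhuabaodemo | test.py | str_to_json
-- ===== SOURCE A (Python) =====
-- def str_to_json(str):
--     r = list()
--     r.append('"')
--     for index in range(len(str)):
--         if(str[index]=='='):
--             r.append('"')
--             r.append(':')
--             r.append('"')
--         elif (str[index]=='&'):
--             r.append('"')
--             r.append(',')
--             r.append('"')
--         else:
--             r.append(str[index])
--     r.append('"')
--     return ''.join(r)
-- ===== SOURCE B (Python) =====
-- def str_to_json(str):
--     return '"' + str.replace('=', '":"').replace('&', '","') + '"'
-- ===== Notes on version B (the rewrite author's own statement) =====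
-- stated objective: idiomatic
-- what changed: Replaced the per-character index loop with its three-branch conditional and list-append by two chained str.replace passes plus quote concatenation.
import Mathlib
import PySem

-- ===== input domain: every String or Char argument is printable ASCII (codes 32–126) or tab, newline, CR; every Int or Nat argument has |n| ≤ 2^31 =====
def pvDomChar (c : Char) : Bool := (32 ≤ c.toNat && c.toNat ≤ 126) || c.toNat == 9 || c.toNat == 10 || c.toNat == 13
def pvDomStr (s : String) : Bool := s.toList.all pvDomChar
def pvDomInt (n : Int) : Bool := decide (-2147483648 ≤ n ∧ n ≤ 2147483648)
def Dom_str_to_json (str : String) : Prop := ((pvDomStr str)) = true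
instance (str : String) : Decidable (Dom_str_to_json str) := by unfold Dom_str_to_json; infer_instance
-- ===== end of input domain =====

-- B replaces A's per-character index loop by two chained str.replace calls plus quote concatenation (idiomatic, same cost).

-- ===== PORT A =====
def str_to_json (str : String) : String :=
  let cs := str.toList
  let r : List String := ["\""]
  let r := (PySem.List.pyRange 0 (PySem.List.len cs)).foldl (fun r index =>
    if PySem.List.pyGetD cs index ' ' = '=' then
      r ++ ["\""] ++ [":"] ++ ["\""]
    else if PySem.List.pyGetD cs index ' ' = '&' then
      r ++ ["\""] ++ [","] ++ ["\""]
    else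
      r ++ [String.ofList [PySem.List.pyGetD cs index ' ']]) r
  PySem.Str.join "" (r ++ ["\""])

-- ===== PORT B =====
def str_to_json_alt (str : String) : String :=
  "\"" ++ PySem.Str.replace (PySem.Str.replace str "=" "\":\"") "&" "\",\"" ++ "\""

-- ===== PRECONDITION & SPEC =====
def Spec_str_to_json (str : String) (out : String) : Prop := out = str_to_json_alt str
instance (str : String) (out : String) : Decidable (Spec_str_to_json str out) := by unfold Spec_str_to_json; infer_instance

-- ===== CLAIM (what is proved, stated in full; the proofs are below) =====
def Claim_equal_str_to_json : Prop := ∀ (str : String), Dom_str_to_json str → Spec_str_to_json str (str_to_json str)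

-- ===== LEMMAS AND PROOFS =====

-- replace with a single-character pattern is a flatMap over the characters
theorem replace_go_single (d : Char) (ns : List Char) :
    ∀ (l : List Char) (fuel : Nat) (acc : List Char), l.length ≤ fuel →
      PySem.Chars.replace.go [d] ns fuel l acc =
        acc.reverse ++ l.flatMap (fun c => if c = d then ns else [c]) := by
  intro l
  induction l with
  | nil =>
    intro fuel acc _
    cases fuel <;> simp [PySem.Chars.replace.go]
  | cons c t ih =>
    intro fuel acc h
    cases fuel with
    | zero => simp at h
    | succ n =>
      by_cases hc : c = d
      · subst hc
        have hp : List.isPrefixOf [c] (c :: t) = true := by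
          simp [List.isPrefixOf]
        simp only [PySem.Chars.replace.go, hp, List.length_cons] at *
        rw [if_pos trivial]
        simp only [List.length_nil, List.drop_zero, List.drop_succ_cons]
        rw [ih n (ns.reverse ++ acc) (by omega)]
        simp [List.flatMap_cons]
      · have hp : List.isPrefixOf [d] (c :: t) = false := by
          simp [List.isPrefixOf]
          exact fun h' => hc h'.symm
        simp only [PySem.Chars.replace.go, hp, Bool.false_eq_true, if_false,
          List.length_cons] at *
        rw [ih n (c :: acc) (by omega)]
        simp [List.flatMap_cons, hc]

theorem replace_single (l : List Char) (d : Char) (ns : List Char) :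
    PySem.Chars.replace l [d] ns = l.flatMap (fun c => if c = d then ns else [c]) := by
  unfold PySem.Chars.replace
  simp [replace_go_single d ns l l.length [] (le_refl _)]

theorem intersperse_nil_flatten : ∀ (xs : List (List Char)),
    (xs.intersperse []).flatten = xs.flatten
  | [] => rfl
  | [p] => rfl
  | p :: q :: qs => by
    have h : List.intersperse ([] : List Char) (p :: q :: qs) =
        p :: [] :: List.intersperse [] (q :: qs) := rfl
    rw [h]
    simp [intersperse_nil_flatten (q :: qs)]

theorem join_empty_sep (parts : List (List Char)) :
    PySem.Chars.join [] parts = parts.flatten := by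
  simp [PySem.Chars.join, List.intercalate, intersperse_nil_flatten]

def pvGA : Char → List String := fun c =>
  if c = '=' then ["\"", ":", "\""]
  else if c = '&' then ["\"", ",", "\""]
  else [String.ofList [c]]

theorem str_to_json_toList (str : String) :
    (str_to_json str).toList =
      '"' :: str.toList.flatMap
        (fun c => if c = '=' then ['"', ':', '"']
                  else if c = '&' then ['"', ',', '"'] else [c]) ++ ['"'] := by
  simp only [str_to_json]
  have hfun : (fun (r : List String) (index : Int) =>
      if PySem.List.pyGetD str.toList index ' ' = '=' then
        r ++ ["\""] ++ [":"] ++ ["\""]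
      else if PySem.List.pyGetD str.toList index ' ' = '&' then
        r ++ ["\""] ++ [","] ++ ["\""]
      else
        r ++ [String.ofList [PySem.List.pyGetD str.toList index ' ']]) =
      (fun r index => r ++ pvGA (PySem.List.pyGetD str.toList index ' ')) := by
    funext r index
    simp only [pvGA]
    split_ifs <;> simp
  rw [hfun]
  rw [PySem.List.foldl_pyRange_pyGetD str.toList ' '
      (fun r c => r ++ pvGA c) ["\""] (le_refl 0)]
  rw [PySem.List.foldl_append_eq_flatMap]
  rw [PySem.Str.toList_join]
  have : ("" : String).toList = ([] : List Char) := rfl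
  rw [this, join_empty_sep]
  simp only [Int.toNat_zero, List.drop_zero, List.map_append, List.map_flatMap,
    List.flatten_append]
  have h1 : (List.map String.toList ["\""]).flatten = ['"'] := rfl
  rw [h1]
  rw [List.flatten_eq_flatMap, List.flatMap_assoc]
  simp only [List.cons_append, List.nil_append]
  congr 1
  congr 1
  apply List.flatMap_congr
  intro c _
  simp only [pvGA]
  split_ifs <;> simp [String.toList_ofList]

theorem str_to_json_alt_toList (str : String) :
    (str_to_json_alt str).toList =
      '"' :: str.toList.flatMap
        (fun c => if c = '=' then ['"', ':', '"']
                  else if c = '&' then ['"', ',', '"'] else [c]) ++ ['"'] := by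
  simp only [str_to_json_alt, String.toList_append, PySem.Str.toList_replace]
  have h1 : ("\"" : String).toList = ['"'] := rfl
  have h2 : ("\":\"" : String).toList = ['"', ':', '"'] := rfl
  have h3 : ("\",\"" : String).toList = ['"', ',', '"'] := rfl
  have h4 : ("=" : String).toList = ['='] := rfl
  have h5 : ("&" : String).toList = ['&'] := rfl
  rw [h1, h2, h3, h4, h5]
  simp only [replace_single]
  rw [List.flatMap_assoc]
  simp only [List.cons_append, List.nil_append]
  congr 1
  congr 1
  apply List.flatMap_congr
  intro c _
  by_cases hc : c = '='
  · subst hc; decide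
  · by_cases hc2 : c = '&'
    · subst hc2; decide
    · simp [hc, hc2]

theorem str_to_json_spec : Claim_equal_str_to_json := by
  intro str _
  unfold Spec_str_to_json
  have h := (str_to_json_toList str).trans (str_to_json_alt_toList str).symm
  exact String.toList_injective h
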